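-- pv_equiv track=rewrite | github.com/hksawczuk/grahamtools | examples/coeff_matrix_n6.py | classify_tree_from_mask
-- ===== SOURCE A (Python) =====
-- from collections import defaultdict
--
-- def base_to_edge_list(base_mask, edge_list):
--     """Convert bitmask to list of edges."""
--     edges = []
--     for i in range(len(edge_list)):
--         if base_mask & (1 << i):
--             edges.append(edge_list[i])
--     return edges
--
-- def classify_tree_from_mask(base_mask, edge_list, n_vertices):
--     """Classify a tree type from its base edge bitmask. Returns type index 0-5 or -1."""
--     edges = base_to_edge_list(base_mask, edge_list)
--     ne = len(edges)
--     if ne != 5: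
--         return -1
--
--     verts = set()
--     for u, v in edges:
--         verts.add(u); verts.add(v)
--     nv = len(verts)
--     if nv != 6:
--         return -1  # not a tree on 6 vertices
--
--     # Check connectivity and compute degree sequence
--     adj = defaultdict(set)
--     for u, v in edges:
--         adj[u].add(v); adj[v].add(u)
--
--     # Quick connectivity check
--     start = next(iter(verts))
--     visited = {start}
--     stack = [start]
--     while stack:
--         v = stack.pop()
--         for u in adj[v]:
--             if u not in visited:
--                 visited.add(u)
--                 stack.append(u)
--     if len(visited) != nv:
--         return -1
--
--     deg_seq = tuple(sorted(adj[v].__len__() for v in verts))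
--
--     # Classify by degree sequence
--     if deg_seq == (1, 1, 2, 2, 2, 2):
--         return 0  # P_6
--     elif deg_seq == (1, 1, 1, 1, 1, 5):
--         return 5  # K_{1,5}
--     elif deg_seq == (1, 1, 1, 1, 3, 3):
--         return 4  # Double star
--     elif deg_seq == (1, 1, 1, 1, 2, 4):
--         return 3  # Spider
--     elif deg_seq == (1, 1, 1, 2, 2, 3):
--         # Two non-isomorphic trees: caterpillar A vs B
--         # Distinguished by: degree-3 vertex's neighbors' degrees
--         v3 = [v for v in verts if len(adj[v]) == 3][0]
--         nbr_degs = sorted(len(adj[u]) for u in adj[v3])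
--         if nbr_degs == [1, 2, 2]:
--             return 1  # Caterpillar A
--         elif nbr_degs == [1, 1, 2]:
--             return 2  # Caterpillar B
--         else:
--             return -1
--     else:
--         return -1
-- ===== SOURCE B (Python) =====
-- def classify_tree_from_mask(base_mask, edge_list, n_vertices):
--     """Classify a tree type from its base edge bitmask. Returns type index 0-5 or -1."""
--     edges = [e for i, e in enumerate(edge_list) if base_mask & (1 << i)]
--     if len(edges) != 5:
--         return -1
--     verts = []
--     for u, v in edges:
--         if u not in verts:
--             verts.append(u)
--         if v not in verts:
--             verts.append(v)
--     if len(verts) != 6: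
--         return -1
--
--     def nbrs(x):
--         out = []
--         for u, v in edges:
--             if u == x and v not in out:
--                 out.append(v)
--             if v == x and u not in out:
--                 out.append(u)
--         return out
--
--     # connectivity by 6 rounds of edge relaxation (no stack, no adjacency sets)
--     reached = [verts[0]]
--     for _ in range(6):
--         for u, v in edges:
--             if u in reached and v not in reached:
--                 reached.append(v)
--             if v in reached and u not in reached:
--                 reached.append(u)
--     if len(reached) != 6:
--         return -1
--
--     ds = tuple(sorted(len(nbrs(v)) for v in verts))
--     table = {(1, 1, 2, 2, 2, 2): 0,
--              (1, 1, 1, 1, 1, 5): 5,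
--              (1, 1, 1, 1, 3, 3): 4,
--              (1, 1, 1, 1, 2, 4): 3}
--     if ds in table:
--         return table[ds]
--     if ds != (1, 1, 1, 2, 2, 3):
--         return -1
--     v3 = next(v for v in verts if len(nbrs(v)) == 3)
--     nd = sorted(len(nbrs(u)) for u in nbrs(v3))
--     if nd == [1, 2, 2]:
--         return 1
--     if nd == [1, 1, 2]:
--         return 2
--     return -1
-- ===== Notes on version B (the rewrite author's own statement) =====
-- stated objective: alternative
-- what changed: Connectivity is decided by six rounds of edge-list relaxation into a grow-only reached list instead of an explicit-stack DFS over a defaultdict of adjacency sets; degrees come from per-vertex scans of the edge list (no adjacency structure is built), and the if/elif degree-sequence ladder becomes a table lookup.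
import Mathlib
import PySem

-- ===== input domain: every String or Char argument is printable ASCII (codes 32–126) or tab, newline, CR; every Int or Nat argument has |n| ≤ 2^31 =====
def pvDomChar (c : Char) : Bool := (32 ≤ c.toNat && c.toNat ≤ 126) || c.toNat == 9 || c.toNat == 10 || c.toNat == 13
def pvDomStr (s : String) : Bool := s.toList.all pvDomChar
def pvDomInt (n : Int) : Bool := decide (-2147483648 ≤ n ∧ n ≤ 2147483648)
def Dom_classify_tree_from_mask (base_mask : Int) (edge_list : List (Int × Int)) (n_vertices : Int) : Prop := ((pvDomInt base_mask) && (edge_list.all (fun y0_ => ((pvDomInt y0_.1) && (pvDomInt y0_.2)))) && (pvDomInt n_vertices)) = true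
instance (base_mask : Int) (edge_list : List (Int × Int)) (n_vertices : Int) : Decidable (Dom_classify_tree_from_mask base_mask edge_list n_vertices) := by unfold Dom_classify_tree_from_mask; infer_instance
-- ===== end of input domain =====

-- B replaces A's stack DFS with rounds of edge relaxation, the defaultdict-of-sets with
-- per-vertex edge scans, and the if/elif ladder with a table lookup (objective: alternative).

-- ===== PORT A =====

-- helper base_to_edge_list: loop over range(len(edge_list)); the index i is in range,
-- so edge_list[i] is ported with pyGetD (exact here); 1 << i with i ≥ 0 is 1 <<< i.toNat (exact).
def base_to_edge_list (base_mask : Int) (edge_list : List (Int × Int)) : List (Int × Int) :=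
  (PySem.List.pyRange 0 (PySem.List.len edge_list) 1).foldl
    (fun edges i =>
      if PySem.Int.band base_mask ((1 : Int) <<< i.toNat) ≠ 0 then
        edges ++ [PySem.List.pyGetD edge_list i (0, 0)]
      else edges) []

-- adj = defaultdict(set); adj[u].add(v); adj[v].add(u)
def pvBuildAdj (edges : List (Int × Int)) : PySem.Dict Int (PySem.Set Int) :=
  edges.foldl
    (fun d uv =>
      let d1 := d.insert uv.1 (PySem.Set.add (d.getD uv.1 PySem.Set.empty) uv.2)
      d1.insert uv.2 (PySem.Set.add (d1.getD uv.2 PySem.Set.empty) uv.1))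
    PySem.Dict.empty

-- inner 'for u in adj[v]: if u not in visited: visited.add(u); stack.append(u)'
-- (stack is kept head-first: append = cons, pop = head — same pop order as Python's list end)
def pvDfsProcess (visited : PySem.Set Int) (stack : List Int) : List Int → PySem.Set Int × List Int
  | [] => (visited, stack)
  | u :: rest =>
    if u ∈ visited then pvDfsProcess visited stack rest
    else pvDfsProcess (PySem.Set.add visited u) (u :: stack) rest

-- 'while stack: v = stack.pop(); …' — fueled; when this DFS runs, adj has at most 6 vertices,
-- so the loop pops at most 11 times and fuel 16 is never exhausted (proved below).
def pvDfsLoop (adj : PySem.Dict Int (PySem.Set Int)) : Nat → PySem.Set Int → List Int → PySem.Set Int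
  | 0, visited, _ => visited
  | _ + 1, visited, [] => visited
  | fuel + 1, visited, v :: stack =>
    let vs := pvDfsProcess visited stack (adj.getD v PySem.Set.empty)
    pvDfsLoop adj fuel vs.1 vs.2

-- classify_tree_from_mask (A). Python iterates the set 'verts' (hash order) only where the
-- result is order-independent: next(iter(verts)) as DFS start (final visited size does not
-- depend on the start's position), sorted(...) generators, and the first-degree-3 pick
-- (unique when the ladder reaches it); the port uses insertion order.
def classify_tree_from_mask (base_mask : Int) (edge_list : List (Int × Int)) (n_vertices : Int) : Int :=
  let edges := base_to_edge_list base_mask edge_list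
  let ne : Int := PySem.List.len edges
  if ne ≠ 5 then -1
  else
    let verts : PySem.Set Int :=
      edges.foldl (fun s uv => PySem.Set.add (PySem.Set.add s uv.1) uv.2) PySem.Set.empty
    let nv : Int := PySem.Set.len verts
    if nv ≠ 6 then -1
    else
      let adj := pvBuildAdj edges
      match verts with
      | [] => -1      -- unreachable: nv = 6
      | start :: _ =>
        let visited := pvDfsLoop adj 16 (PySem.Set.add PySem.Set.empty start) [start]
        if (PySem.List.len visited : Int) ≠ nv then -1
        else
          let deg_seq :=
            PySem.List.sorted
              (verts.map (fun v => (PySem.List.len (adj.getD v PySem.Set.empty) : Int)))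
              (fun x => x) false
          if deg_seq = [1, 1, 2, 2, 2, 2] then 0
          else if deg_seq = [1, 1, 1, 1, 1, 5] then 5
          else if deg_seq = [1, 1, 1, 1, 3, 3] then 4
          else if deg_seq = [1, 1, 1, 1, 2, 4] then 3
          else if deg_seq = [1, 1, 1, 2, 2, 3] then
            match PySem.List.pyGet?
                (verts.filter (fun v => decide ((PySem.List.len (adj.getD v PySem.Set.empty) : Int) = 3))) 0 with
            | none => -1      -- unreachable: a degree-3 vertex exists (Python would raise IndexError)
            | some v3 =>
              let nbr_degs :=
                PySem.List.sorted
                  ((adj.getD v3 PySem.Set.empty).map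
                    (fun u => (PySem.List.len (adj.getD u PySem.Set.empty) : Int)))
                  (fun x => x) false
              if nbr_degs = [1, 2, 2] then 1
              else if nbr_degs = [1, 1, 2] then 2
              else -1
          else -1

-- ===== PORT B =====

-- edges = [e for i, e in enumerate(edge_list) if base_mask & (1 << i)]
def pvDecodeB (base_mask : Int) (edge_list : List (Int × Int)) : List (Int × Int) :=
  ((PySem.List.enumerate edge_list 0).filter
      (fun p => decide (PySem.Int.band base_mask ((1 : Int) <<< p.1.toNat) ≠ 0))).map (·.2)

-- ordered distinct endpoints
def pvVertsB (edges : List (Int × Int)) : List Int :=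
  edges.foldl
    (fun vs uv =>
      let vs1 := if uv.1 ∈ vs then vs else vs ++ [uv.1]
      if uv.2 ∈ vs1 then vs1 else vs1 ++ [uv.2]) []

-- nbrs(x): distinct neighbours of x by one scan of the edge list
def pvNbrs (edges : List (Int × Int)) (x : Int) : List Int :=
  edges.foldl
    (fun out uv =>
      let o1 := if uv.1 = x ∧ uv.2 ∉ out then out ++ [uv.2] else out
      if uv.2 = x ∧ uv.1 ∉ o1 then o1 ++ [uv.1] else o1) []

-- one relaxation round over the edge list
def pvRelaxRound (edges : List (Int × Int)) (reached : List Int) : List Int :=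
  edges.foldl
    (fun r uv =>
      let r1 := if uv.1 ∈ r ∧ uv.2 ∉ r then r ++ [uv.2] else r
      if uv.2 ∈ r1 ∧ uv.1 ∉ r1 then r1 ++ [uv.1] else r1) reached

def classify_tree_from_mask_alt (base_mask : Int) (edge_list : List (Int × Int)) (n_vertices : Int) : Int :=
  let edges := pvDecodeB base_mask edge_list
  if (PySem.List.len edges : Int) ≠ 5 then -1
  else
    let verts := pvVertsB edges
    if (PySem.List.len verts : Int) ≠ 6 then -1
    else
      match verts with
      | [] => -1      -- unreachable: len(verts) = 6
      | v0 :: _ =>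
        let reached := (List.range 6).foldl (fun r _ => pvRelaxRound edges r) [v0]
        if (PySem.List.len reached : Int) ≠ 6 then -1
        else
          let ds :=
            PySem.List.sorted (verts.map (fun v => (PySem.List.len (pvNbrs edges v) : Int)))
              (fun x => x) false
          let table : PySem.Dict (List Int) Int :=
            PySem.Dict.ofList
              [([1, 1, 2, 2, 2, 2], 0), ([1, 1, 1, 1, 1, 5], 5),
               ([1, 1, 1, 1, 3, 3], 4), ([1, 1, 1, 1, 2, 4], 3)]
          match table.get? ds with
          | some t => t
          | none =>
            if ds ≠ [1, 1, 1, 2, 2, 3] then -1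
            else
              match verts.find? (fun v => decide ((PySem.List.len (pvNbrs edges v) : Int) = 3)) with
              | none => -1      -- unreachable: a degree-3 vertex exists (Python would raise StopIteration)
              | some v3 =>
                let nd :=
                  PySem.List.sorted
                    ((pvNbrs edges v3).map (fun u => (PySem.List.len (pvNbrs edges u) : Int)))
                    (fun x => x) false
                if nd = [1, 2, 2] then 1
                else if nd = [1, 1, 2] then 2
                else -1

-- ===== PRECONDITION & SPEC =====
def Spec_classify_tree_from_mask (base_mask : Int) (edge_list : List (Int × Int)) (n_vertices : Int) (out : Int) : Prop := out = classify_tree_from_mask_alt base_mask edge_list n_vertices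
instance (base_mask : Int) (edge_list : List (Int × Int)) (n_vertices : Int) (out : Int) : Decidable (Spec_classify_tree_from_mask base_mask edge_list n_vertices out) := by unfold Spec_classify_tree_from_mask; infer_instance

-- ===== CLAIM (what is proved, stated in full; the proofs are below) =====
def Claim_equal_classify_tree_from_mask : Prop := ∀ (base_mask : Int) (edge_list : List (Int × Int)) (n_vertices : Int), Dom_classify_tree_from_mask base_mask edge_list n_vertices → Spec_classify_tree_from_mask base_mask edge_list n_vertices (classify_tree_from_mask base_mask edge_list n_vertices)

-- ===== LEMMAS AND PROOFS =====

-- one undirected step along some listed edge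
def pvRel (edges : List (Int × Int)) (a b : Int) : Prop :=
  ∃ uv ∈ edges, (a = uv.1 ∧ b = uv.2) ∨ (a = uv.2 ∧ b = uv.1)

def pvReach (edges : List (Int × Int)) (s x : Int) : Prop :=
  Relation.ReflTransGen (pvRel edges) s x

theorem pvSetAdd_eq (s : PySem.Set Int) (x : Int) :
    PySem.Set.add s x = if x ∈ s then s else s ++ [x] := by
  simp [PySem.Set.add, PySem.Set.contains]

theorem pvVerts_eq (edges : List (Int × Int)) :
    edges.foldl
      (fun s uv => PySem.Set.add (PySem.Set.add s uv.1) uv.2) PySem.Set.empty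
      = pvVertsB edges := by
  unfold pvVertsB
  apply PySem.List.foldl_congr_mem
  intro acc uv _
  simp [pvSetAdd_eq]
theorem pvFoldlAppendIf {α β : Type} (p : α → Prop) [DecidablePred p] (f : α → β) :
    ∀ (l : List α) (acc : List β),
      l.foldl (fun acc x => if p x then acc ++ [f x] else acc) acc
        = acc ++ (l.filter (fun x => decide (p x))).map f := by
  intro l
  induction l with
  | nil => simp
  | cons a t ih =>
    intro acc
    by_cases h : p a <;> simp [h, ih, List.append_assoc]

theorem pvDecode_eq (base_mask : Int) (edge_list : List (Int × Int)) :
    base_to_edge_list base_mask edge_list = pvDecodeB base_mask edge_list := by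
  unfold base_to_edge_list pvDecodeB
  rw [PySem.List.enumerate_eq_map_pyRange (d := (0,0))]
  rw [List.filter_map, List.map_map]
  rw [pvFoldlAppendIf]
  simp only [Function.comp_def, List.nil_append]
-- B's neighbour scan with an explicit accumulator (proof helper)
def pvNbrsFrom (edges : List (Int × Int)) (x : Int) (acc : List Int) : List Int :=
  edges.foldl
    (fun out uv =>
      let o1 := if uv.1 = x ∧ uv.2 ∉ out then out ++ [uv.2] else out
      if uv.2 = x ∧ uv.1 ∉ o1 then o1 ++ [uv.1] else o1) acc

theorem pvNbrsFrom_nil (x : Int) (acc : List Int) : pvNbrsFrom [] x acc = acc := rfl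

theorem pvNbrs_eq_from (edges : List (Int × Int)) (x : Int) :
    pvNbrs edges x = pvNbrsFrom edges x [] := rfl

theorem pvAdj_fold_getD (edges : List (Int × Int)) :
    ∀ (d : PySem.Dict Int (PySem.Set Int)) (x : Int),
      (edges.foldl
        (fun d uv =>
          let d1 := d.insert uv.1 (PySem.Set.add (d.getD uv.1 PySem.Set.empty) uv.2)
          d1.insert uv.2 (PySem.Set.add (d1.getD uv.2 PySem.Set.empty) uv.1)) d).getD x PySem.Set.empty
      = pvNbrsFrom edges x (d.getD x PySem.Set.empty) := by
  induction edges with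
  | nil => intro d x; rfl
  | cons uv t ih =>
    intro d x
    obtain ⟨u, v⟩ := uv
    simp only [List.foldl_cons, pvNbrsFrom, ih]
    congr 1
    dsimp only
    simp only [PySem.Dict.getD_insert, pvSetAdd_eq]
    by_cases hv : x = v <;> by_cases hu : x = u
    · subst hv; subst hu
      by_cases hm : x ∈ d.getD x PySem.Set.empty <;> simp [hm]
    · subst hv
      have hu' : ¬ u = x := fun h => hu h.symm
      by_cases hm : u ∈ d.getD x PySem.Set.empty <;> simp [hu, hu', hm]
    · subst hu
      have hv' : ¬ v = x := fun h => hv h.symm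
      by_cases hm : v ∈ d.getD x PySem.Set.empty <;> simp [hv, hv', hm]
    · have hu' : ¬ u = x := fun h => hu h.symm
      have hv' : ¬ v = x := fun h => hv h.symm
      simp [hu, hu', hv, hv']

theorem pvAdj_getD (edges : List (Int × Int)) (x : Int) :
    (pvBuildAdj edges).getD x PySem.Set.empty = pvNbrs edges x := by
  rw [pvBuildAdj, pvAdj_fold_getD, pvNbrs_eq_from]
  rfl

theorem pvNbrsFrom_mem (edges : List (Int × Int)) (x : Int) :
    ∀ (acc : List Int) (y : Int),
      y ∈ pvNbrsFrom edges x acc ↔ y ∈ acc ∨ pvRel edges x y := by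
  induction edges with
  | nil => simp [pvNbrsFrom_nil, pvRel]
  | cons uv t ih =>
    intro acc y
    obtain ⟨u, v⟩ := uv
    show y ∈ pvNbrsFrom t x _ ↔ _
    rw [ih]
    dsimp only
    have hrel : pvRel ((u, v) :: t) x y ↔ ((x = u ∧ y = v) ∨ (x = v ∧ y = u)) ∨ pvRel t x y := by
      simp only [pvRel, List.mem_cons]
      constructor
      · rintro ⟨w, (rfl | hw), h⟩
        · exact Or.inl h
        · exact Or.inr ⟨w, hw, h⟩
      · rintro (h | ⟨w, hw, h⟩)
        · exact ⟨(u, v), Or.inl rfl, h⟩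
        · exact ⟨w, Or.inr hw, h⟩
    rw [hrel]
    split_ifs with h1 h2 h2 <;> (try simp_all) <;> aesop

theorem pvNodupApp {l : List Int} {a : Int} (h : l.Nodup) (ha : a ∉ l) : (l ++ [a]).Nodup := by
  simp [List.nodup_append]
  exact ⟨h, fun b hb hba => ha (hba ▸ hb)⟩

theorem pvNbrs_mem (edges : List (Int × Int)) (x y : Int) :
    y ∈ pvNbrs edges x ↔ pvRel edges x y := by
  rw [pvNbrs_eq_from, pvNbrsFrom_mem]; simp

def pvVertsFrom (edges : List (Int × Int)) (acc : List Int) : List Int :=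
  edges.foldl
    (fun vs uv =>
      let vs1 := if uv.1 ∈ vs then vs else vs ++ [uv.1]
      if uv.2 ∈ vs1 then vs1 else vs1 ++ [uv.2]) acc

theorem pvVertsB_eq_from (edges : List (Int × Int)) : pvVertsB edges = pvVertsFrom edges [] := rfl

theorem pvVertsFrom_mem (edges : List (Int × Int)) :
    ∀ (acc : List Int) (y : Int),
      y ∈ pvVertsFrom edges acc ↔ y ∈ acc ∨ ∃ uv ∈ edges, y = uv.1 ∨ y = uv.2 := by
  induction edges with
  | nil => simp [pvVertsFrom]
  | cons uv t ih =>
    intro acc y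
    show y ∈ pvVertsFrom t _ ↔ _
    rw [ih]
    dsimp only
    split_ifs <;> (try simp_all) <;> aesop

theorem pvRel_mem_verts {edges : List (Int × Int)} {a b : Int} (h : pvRel edges a b) :
    b ∈ pvVertsB edges := by
  rw [pvVertsB_eq_from, pvVertsFrom_mem]
  obtain ⟨uv, hm, h⟩ := h
  exact Or.inr ⟨uv, hm, h.elim (fun h => Or.inr h.2) (fun h => Or.inl h.2)⟩

-- ===== DFS inner loop spec =====
theorem pvDfsProcess_spec :
    ∀ (L : List Int) (visited : PySem.Set Int) (stack : List Int),
      (∀ x ∈ visited, x ∈ (pvDfsProcess visited stack L).1) ∧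
      (∀ u ∈ L, u ∈ (pvDfsProcess visited stack L).1) ∧
      (∀ x ∈ (pvDfsProcess visited stack L).1, x ∈ visited ∨ x ∈ L) ∧
      (∀ x ∈ (pvDfsProcess visited stack L).2, x ∈ stack ∨ x ∈ L) ∧
      (∀ x ∈ stack, x ∈ (pvDfsProcess visited stack L).2) ∧
      (visited.Nodup → (pvDfsProcess visited stack L).1.Nodup) ∧
      ((pvDfsProcess visited stack L).1.length + stack.length
        = visited.length + (pvDfsProcess visited stack L).2.length) ∧
      (∀ x ∈ (pvDfsProcess visited stack L).1, x ∉ visited → x ∈ (pvDfsProcess visited stack L).2) := by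
  intro L
  induction L with
  | nil =>
    intro visited stack
    exact ⟨fun x hx => hx, by simp, fun x hx => Or.inl hx, fun x hx => Or.inl hx,
      fun x hx => hx, fun h => h, rfl, fun x hx hnx => absurd hx hnx⟩
  | cons u rest ih =>
    intro visited stack
    simp only [pvDfsProcess]
    by_cases h : u ∈ visited
    · simp only [if_pos h]
      obtain ⟨a, b, c, d, e, f, g, i⟩ := ih visited stack
      refine ⟨a, ?_, fun x hx => (c x hx).imp_right (by simp_all), fun x hx => (d x hx).imp_right (by simp_all),
        e, f, g, i⟩
      intro w hw
      rcases List.mem_cons.mp hw with rfl | hw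
      · exact a w h
      · exact b w hw
    · simp only [if_neg h, pvSetAdd_eq, if_neg h]
      obtain ⟨a, b, c, d, e, f, g, i⟩ := ih (visited ++ [u]) (u :: stack)
      refine ⟨?_, ?_, ?_, ?_, ?_, ?_, ?_, ?_⟩
      · exact fun x hx => a x (by simp [hx])
      · intro w hw
        rcases List.mem_cons.mp hw with rfl | hw
        · exact a w (by simp)
        · exact b w hw
      · intro x hx
        rcases c x hx with hx' | hx'
        · rcases List.mem_append.mp hx' with h' | h'
          · exact Or.inl h'
          · simp_all
        · simp_all
      · intro x hx
        rcases d x hx with hx' | hx'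
        · rcases List.mem_cons.mp hx' with rfl | h'
          · simp
          · exact Or.inl h'
        · simp_all
      · exact fun x hx => e x (List.mem_cons_of_mem _ hx)
      · exact fun hn => f (pvNodupApp hn h)
      · simp only [List.length_append, List.length_cons, List.length_nil] at g ⊢
        omega
      · intro x hx hnx
        by_cases hxu : x = u
        · subst hxu
          exact e x (by simp)
        · exact i x hx (by simp [List.mem_append, hnx, hxu])
theorem pvNodupSubsetLen {l₁ l₂ : List Int} (h : l₁.Nodup) (hs : ∀ x ∈ l₁, x ∈ l₂) :
    l₁.length ≤ l₂.length :=
  (List.Nodup.subperm h hs).length_le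

theorem pvDfsLoop_spec (edges : List (Int × Int)) (start : Int) :
    ∀ (fuel : Nat) (visited : PySem.Set Int) (stack : List Int),
      visited.Nodup →
      (∀ x ∈ stack, x ∈ visited) →
      (∀ x ∈ visited, x ∈ pvVertsB edges) →
      (∀ x ∈ visited, pvReach edges start x) →
      (∀ x ∈ visited, x ∈ stack ∨ (∀ u, pvRel edges x u → u ∈ visited)) →
      2 * ((pvVertsB edges).length - visited.length) + stack.length < fuel →
      (∀ x ∈ visited, x ∈ pvDfsLoop (pvBuildAdj edges) fuel visited stack) ∧
      (pvDfsLoop (pvBuildAdj edges) fuel visited stack).Nodup ∧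
      (∀ x ∈ pvDfsLoop (pvBuildAdj edges) fuel visited stack, pvReach edges start x) ∧
      (∀ x ∈ pvDfsLoop (pvBuildAdj edges) fuel visited stack,
        ∀ u, pvRel edges x u → u ∈ pvDfsLoop (pvBuildAdj edges) fuel visited stack) := by
  intro fuel
  induction fuel with
  | zero => intro visited stack _ _ _ _ _ hm; omega
  | succ fuel ih =>
    intro visited stack hnd hsv hvv hre hinv hm
    match stack with
    | [] =>
      refine ⟨fun x hx => hx, hnd, hre, ?_⟩
      intro x hx u hrel
      rcases hinv x hx with h | h
      · simp at h
      · exact h u hrel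
    | v :: st =>
      simp only [pvDfsLoop]
      have hL := pvAdj_getD edges v
      obtain ⟨a, b, c, d, e, f, g, i⟩ :=
        pvDfsProcess_spec ((pvBuildAdj edges).getD v PySem.Set.empty) visited st
      set V' := (pvDfsProcess visited st ((pvBuildAdj edges).getD v PySem.Set.empty)).1 with hV'
      set S' := (pvDfsProcess visited st ((pvBuildAdj edges).getD v PySem.Set.empty)).2 with hS'
      have hvmem : v ∈ visited := hsv v (by simp)
      have hLrel : ∀ u, u ∈ (pvBuildAdj edges).getD v PySem.Set.empty ↔ pvRel edges v u := by
        intro u; rw [hL, pvNbrs_mem]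
      have hV'v : ∀ x ∈ V', x ∈ pvVertsB edges := by
        intro x hx
        rcases c x hx with h | h
        · exact hvv x h
        · exact pvRel_mem_verts ((hLrel x).mp h)
      have hV'nd : V'.Nodup := f hnd
      have hlen : V'.length ≤ (pvVertsB edges).length := pvNodupSubsetLen hV'nd hV'v
      have hlenv : visited.length ≤ V'.length := pvNodupSubsetLen hnd (fun x hx => a x hx)
      have := ih V' S'
        hV'nd
        (fun x hx => by
          rcases d x hx with h | h
          · exact a x (hsv x (List.mem_cons_of_mem _ h))
          · exact b x h)
        hV'v
        (fun x hx => by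
          rcases c x hx with h | h
          · exact hre x h
          · exact Relation.ReflTransGen.tail (hre v hvmem) ((hLrel x).mp h))
        (fun x hx => by
          by_cases hxv : x ∈ visited
          · rcases hinv x hxv with h | h
            · rcases List.mem_cons.mp h with rfl | h
              · exact Or.inr (fun u hrel => b u ((hLrel u).mpr hrel))
              · exact Or.inl (e x h)
            · exact Or.inr (fun u hrel => a u (h u hrel))
          · exact Or.inl (i x hx hxv))
        (by
          have hg := g
          simp only [List.length_cons] at hm
          omega)
      refine ⟨fun x hx => this.1 x (a x hx), this.2.1, this.2.2.1, this.2.2.2⟩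
theorem pvDfs_char (edges : List (Int × Int)) (start : Int)
    (hstart : start ∈ pvVertsB edges) (hlen : (pvVertsB edges).length = 6) :
    (∀ x, x ∈ pvDfsLoop (pvBuildAdj edges) 16 (PySem.Set.add PySem.Set.empty start) [start]
      ↔ pvReach edges start x) ∧
    (pvDfsLoop (pvBuildAdj edges) 16 (PySem.Set.add PySem.Set.empty start) [start]).Nodup := by
  have hinit : PySem.Set.add PySem.Set.empty start = [start] := rfl
  rw [hinit]
  obtain ⟨h1, h2, h3, h4⟩ := pvDfsLoop_spec edges start 16 [start] [start]
    (by simp)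
    (fun x hx => hx)
    (by intro x hx; rcases List.mem_singleton.mp hx with rfl; exact hstart)
    (by intro x hx; rcases List.mem_singleton.mp hx with rfl; exact Relation.ReflTransGen.refl)
    (fun x hx => Or.inl hx)
    (by rw [hlen]; simp)
  refine ⟨fun x => ⟨h3 x, ?_⟩, h2⟩
  intro h
  induction h with
  | refl => exact h1 start (by simp)
  | tail _ hrel ih => exact h4 _ ih _ hrel

-- ===== B-side: relaxation rounds =====
theorem pvRelaxStep_prefix (r : List Int) (uv : Int × Int) :
    r <+:
      (let r1 := if uv.1 ∈ r ∧ uv.2 ∉ r then r ++ [uv.2] else r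
       if uv.2 ∈ r1 ∧ uv.1 ∉ r1 then r1 ++ [uv.1] else r1) := by
  dsimp only
  split_ifs <;> simp [List.prefix_append, (List.prefix_append r _).trans (List.prefix_append _ _)]

theorem pvRelaxRound_from_prefix (l : List (Int × Int)) :
    ∀ (r : List Int),
      r <+: l.foldl
        (fun r uv =>
          let r1 := if uv.1 ∈ r ∧ uv.2 ∉ r then r ++ [uv.2] else r
          if uv.2 ∈ r1 ∧ uv.1 ∉ r1 then r1 ++ [uv.1] else r1) r := by
  induction l with
  | nil => intro r; simp
  | cons uv t ih =>
    intro r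
    exact (pvRelaxStep_prefix r uv).trans (ih _)

theorem pvRelaxRound_prefix (edges : List (Int × Int)) (r : List Int) :
    r <+: pvRelaxRound edges r := pvRelaxRound_from_prefix edges r

theorem pvRelaxRound_nodup (l : List (Int × Int)) :
    ∀ (r : List Int), r.Nodup →
      (l.foldl
        (fun r uv =>
          let r1 := if uv.1 ∈ r ∧ uv.2 ∉ r then r ++ [uv.2] else r
          if uv.2 ∈ r1 ∧ uv.1 ∉ r1 then r1 ++ [uv.1] else r1) r).Nodup := by
  induction l with
  | nil => intro r h; simpa using h
  | cons uv t ih =>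
    intro r h
    apply ih
    dsimp only
    split_ifs with h1 h2 h2
    · exact pvNodupApp (pvNodupApp h h1.2) h2.2
    · exact pvNodupApp h h1.2
    · exact pvNodupApp h h2.2
    · exact h

theorem pvRelaxRound_mem_src (l : List (Int × Int)) :
    ∀ (r : List Int) (x : Int),
      x ∈ l.foldl
        (fun r uv =>
          let r1 := if uv.1 ∈ r ∧ uv.2 ∉ r then r ++ [uv.2] else r
          if uv.2 ∈ r1 ∧ uv.1 ∉ r1 then r1 ++ [uv.1] else r1) r →
      x ∈ r ∨ ∃ uv ∈ l, x = uv.1 ∨ x = uv.2 := by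
  induction l with
  | nil => intro r x hx; exact Or.inl (by simpa using hx)
  | cons uv t ih =>
    intro r x hx
    rcases ih _ x hx with h | h
    · revert h; dsimp only; split_ifs <;> simp_all <;> aesop
    · exact Or.inr (by obtain ⟨w, hw, h⟩ := h; exact ⟨w, List.mem_cons_of_mem _ hw, h⟩)

theorem pvRelaxRound_sound (edges : List (Int × Int)) (start : Int) :
    ∀ (l : List (Int × Int)), (∀ uv ∈ l, uv ∈ edges) →
      ∀ (r : List Int), (∀ x ∈ r, pvReach edges start x) →
        ∀ x ∈ l.foldl
          (fun r uv =>
            let r1 := if uv.1 ∈ r ∧ uv.2 ∉ r then r ++ [uv.2] else r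
            if uv.2 ∈ r1 ∧ uv.1 ∉ r1 then r1 ++ [uv.1] else r1) r,
          pvReach edges start x := by
  intro l
  induction l with
  | nil => intro _ r hr x hx; exact hr x (by simpa using hx)
  | cons uv t ih =>
    intro hsub r hr x hx
    refine ih (fun w hw => hsub w (List.mem_cons_of_mem _ hw)) _ ?_ x hx
    have huv : uv ∈ edges := hsub uv (by simp)
    dsimp only
    split_ifs with h1 h2 h2 <;> intro y hy
    · rcases List.mem_append.mp hy with hy | hy
      · rcases List.mem_append.mp hy with hy | hy
        · exact hr y hy
        · rcases List.mem_singleton.mp hy with rfl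
          exact Relation.ReflTransGen.tail (hr _ h1.1) ⟨uv, huv, Or.inl ⟨rfl, rfl⟩⟩
      · rcases List.mem_singleton.mp hy with rfl
        rcases List.mem_append.mp h2.1 with hm | hm
        · exact Relation.ReflTransGen.tail (hr _ hm) ⟨uv, huv, Or.inr ⟨rfl, rfl⟩⟩
        · exact Relation.ReflTransGen.tail
            (Relation.ReflTransGen.tail (hr _ h1.1) ⟨uv, huv, Or.inl ⟨rfl, rfl⟩⟩)
            ⟨uv, huv, Or.inr ⟨rfl, rfl⟩⟩
    · rcases List.mem_append.mp hy with hy | hy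
      · exact hr y hy
      · rcases List.mem_singleton.mp hy with rfl
        exact Relation.ReflTransGen.tail (hr _ h1.1) ⟨uv, huv, Or.inl ⟨rfl, rfl⟩⟩
    · rcases List.mem_append.mp hy with hy | hy
      · exact hr y hy
      · rcases List.mem_singleton.mp hy with rfl
        exact Relation.ReflTransGen.tail (hr _ h2.1) ⟨uv, huv, Or.inr ⟨rfl, rfl⟩⟩
    · exact hr y hy
theorem pvRound_fixed_of_closed :
    ∀ (l : List (Int × Int)) (r : List Int),
      (∀ uv ∈ l, (uv.1 ∈ r → uv.2 ∈ r) ∧ (uv.2 ∈ r → uv.1 ∈ r)) →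
      l.foldl
        (fun r uv =>
          let r1 := if uv.1 ∈ r ∧ uv.2 ∉ r then r ++ [uv.2] else r
          if uv.2 ∈ r1 ∧ uv.1 ∉ r1 then r1 ++ [uv.1] else r1) r = r := by
  intro l
  induction l with
  | nil => intro r _; rfl
  | cons uv t ih =>
    intro r hc
    have h := hc uv (by simp)
    have hstep :
        (let r1 := if uv.1 ∈ r ∧ uv.2 ∉ r then r ++ [uv.2] else r
          if uv.2 ∈ r1 ∧ uv.1 ∉ r1 then r1 ++ [uv.1] else r1) = r := by
      dsimp only
      have h1 : ¬ (uv.1 ∈ r ∧ uv.2 ∉ r) := fun hx => hx.2 (h.1 hx.1)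
      rw [if_neg h1, if_neg (fun hx : uv.2 ∈ r ∧ uv.1 ∉ r => hx.2 (h.2 hx.1))]
    rw [List.foldl_cons, hstep]
    exact ih r (fun w hw => hc w (List.mem_cons_of_mem _ hw))

theorem pvPrefixEqOfLen {l₁ l₂ : List Int} (h : l₁ <+: l₂) (hl : l₂.length ≤ l₁.length) : l₁ = l₂ :=
  List.IsPrefix.eq_of_length_le h (by omega)

theorem pvRound_closed_of_fixed :
    ∀ (l : List (Int × Int)) (r : List Int),
      l.foldl
        (fun r uv =>
          let r1 := if uv.1 ∈ r ∧ uv.2 ∉ r then r ++ [uv.2] else r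
          if uv.2 ∈ r1 ∧ uv.1 ∉ r1 then r1 ++ [uv.1] else r1) r = r →
      ∀ uv ∈ l, (uv.1 ∈ r → uv.2 ∈ r) ∧ (uv.2 ∈ r → uv.1 ∈ r) := by
  intro l
  induction l with
  | nil => intro r _ uv hm; simp at hm
  | cons uv t ih =>
    intro r hfix w hw
    rw [List.foldl_cons] at hfix
    have hpre1 : r <+: (let r1 := if uv.1 ∈ r ∧ uv.2 ∉ r then r ++ [uv.2] else r
          if uv.2 ∈ r1 ∧ uv.1 ∉ r1 then r1 ++ [uv.1] else r1) := pvRelaxStep_prefix r uv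
    have hpre2 := pvRelaxRound_from_prefix t (let r1 := if uv.1 ∈ r ∧ uv.2 ∉ r then r ++ [uv.2] else r
          if uv.2 ∈ r1 ∧ uv.1 ∉ r1 then r1 ++ [uv.1] else r1)
    have hstep_eq : (let r1 := if uv.1 ∈ r ∧ uv.2 ∉ r then r ++ [uv.2] else r
          if uv.2 ∈ r1 ∧ uv.1 ∉ r1 then r1 ++ [uv.1] else r1) = r := by
      apply pvPrefixEqOfLen
      · conv_rhs => rw [← hfix]
        exact hpre2
      · exact List.IsPrefix.length_le hpre1
    have hcond : (uv.1 ∈ r → uv.2 ∈ r) ∧ (uv.2 ∈ r → uv.1 ∈ r) := by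
      revert hstep_eq
      dsimp only
      split_ifs with h1 h2 h2 <;> intro heq
      · exfalso
        have : r.length + 2 = r.length := by
          have := congrArg List.length heq; simpa using this
        omega
      · exfalso
        have : r.length + 1 = r.length := by
          have := congrArg List.length heq; simpa using this
        omega
      · exfalso
        have : r.length + 1 = r.length := by
          have := congrArg List.length heq; simpa using this
        omega
      · constructor
        · intro hm; by_cases hm2 : uv.2 ∈ r
          · exact hm2
          · exact absurd ⟨hm, hm2⟩ h1
        · intro hm; by_cases hm1 : uv.1 ∈ r
          · exact hm1
          · exact absurd ⟨hm, hm1⟩ h2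
    rcases List.mem_cons.mp hw with rfl | hw
    · exact hcond
    · rw [hstep_eq] at hfix
      exact ih r hfix w hw
theorem pvFoldlRange (n : Nat) (f : List Int → List Int) (R : List Int) :
    (List.range n).foldl (fun r _ => f r) R = f^[n] R := by
  induction n generalizing R with
  | zero => rfl
  | succ n ih =>
    rw [List.range_succ, List.foldl_append, ih, Function.iterate_succ_apply']
    rfl

theorem pvIterFix {f : List Int → List Int} {R : List Int} (h : f R = R) :
    ∀ n, f^[n] R = R := by
  intro n
  induction n with
  | zero => rfl
  | succ n ih => rw [Function.iterate_succ_apply, h, ih]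

theorem pvRelaxRound_growth {edges : List (Int × Int)} {R : List Int}
    (h : pvRelaxRound edges R ≠ R) : R.length + 1 ≤ (pvRelaxRound edges R).length := by
  have hp := pvRelaxRound_prefix edges R
  have hle := List.IsPrefix.length_le hp
  by_contra hcon
  exact h (pvPrefixEqOfLen hp (by omega)).symm

theorem pvRelaxRound_sub_verts (edges : List (Int × Int)) (R : List Int)
    (h : ∀ x ∈ R, x ∈ pvVertsB edges) :
    ∀ x ∈ pvRelaxRound edges R, x ∈ pvVertsB edges := by
  intro x hx
  rcases pvRelaxRound_mem_src edges R x hx with h' | h'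
  · exact h x h'
  · rw [pvVertsB_eq_from, pvVertsFrom_mem]
    exact Or.inr h'

theorem pvIterClosed (edges : List (Int × Int)) :
    ∀ (n : Nat) (R : List Int), R.Nodup → (∀ x ∈ R, x ∈ pvVertsB edges) →
      (pvVertsB edges).length ≤ n + R.length →
      pvRelaxRound edges ((pvRelaxRound edges)^[n] R) = (pvRelaxRound edges)^[n] R := by
  intro n
  induction n with
  | zero =>
    intro R hnd hsub hlen
    simp only [Function.iterate_zero, id]
    apply pvRound_fixed_of_closed
    have hperm : R.Perm (pvVertsB edges) :=
      (List.Nodup.subperm hnd hsub).perm_of_length_le (by omega)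
    have hmem : ∀ y, y ∈ pvVertsB edges → y ∈ R := fun y hy => hperm.mem_iff.mpr hy
    intro uv hm
    constructor
    · intro _
      exact hmem _ (by rw [pvVertsB_eq_from, pvVertsFrom_mem]; exact Or.inr ⟨uv, hm, Or.inr rfl⟩)
    · intro _
      exact hmem _ (by rw [pvVertsB_eq_from, pvVertsFrom_mem]; exact Or.inr ⟨uv, hm, Or.inl rfl⟩)
  | succ n ih =>
    intro R hnd hsub hlen
    by_cases hfix : pvRelaxRound edges R = R
    · rw [pvIterFix hfix]
      exact hfix
    · rw [Function.iterate_succ_apply]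
      exact ih (pvRelaxRound edges R) (pvRelaxRound_nodup edges R hnd)
        (pvRelaxRound_sub_verts edges R hsub)
        (by have := pvRelaxRound_growth hfix; omega)

theorem pvIter_nodup (edges : List (Int × Int)) (R : List Int) (h : R.Nodup) :
    ∀ n, ((pvRelaxRound edges)^[n] R).Nodup := by
  intro n
  induction n with
  | zero => exact h
  | succ n ih => rw [Function.iterate_succ_apply']; exact pvRelaxRound_nodup edges _ ih

theorem pvIter_mem (edges : List (Int × Int)) (R : List Int) (x : Int) (h : x ∈ R) :
    ∀ n, x ∈ (pvRelaxRound edges)^[n] R := by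
  intro n
  induction n with
  | zero => exact h
  | succ n ih =>
    rw [Function.iterate_succ_apply']
    exact (pvRelaxRound_prefix edges _).subset ih

theorem pvIter_sound (edges : List (Int × Int)) (v0 : Int) :
    ∀ n, ∀ x ∈ (pvRelaxRound edges)^[n] [v0], pvReach edges v0 x := by
  intro n
  induction n with
  | zero =>
    intro x hx
    rcases List.mem_singleton.mp hx with rfl
    exact Relation.ReflTransGen.refl
  | succ n ih =>
    rw [Function.iterate_succ_apply']
    exact pvRelaxRound_sound edges v0 edges (fun uv h => h) _ ih

theorem pvRelax_char (edges : List (Int × Int)) (v0 : Int)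
    (hv0 : v0 ∈ pvVertsB edges) (hlen : (pvVertsB edges).length = 6) :
    (∀ x, x ∈ (List.range 6).foldl (fun r _ => pvRelaxRound edges r) [v0] ↔ pvReach edges v0 x) ∧
    ((List.range 6).foldl (fun r _ => pvRelaxRound edges r) [v0]).Nodup := by
  rw [pvFoldlRange]
  have hclosed := pvIterClosed edges 6 [v0] (by simp)
    (by intro x hx; rcases List.mem_singleton.mp hx with rfl; exact hv0)
    (by simp [hlen])
  have hcl := pvRound_closed_of_fixed edges _ hclosed
  refine ⟨fun x => ⟨pvIter_sound edges v0 6 x, ?_⟩, pvIter_nodup edges [v0] (by simp) 6⟩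
  intro h
  induction h with
  | refl => exact pvIter_mem edges [v0] v0 (by simp) 6
  | tail _ hrel ih =>
    obtain ⟨uv, hm, hcase⟩ := hrel
    rcases hcase with ⟨hb, hc⟩ | ⟨hb, hc⟩
    · subst hb; subst hc; exact (hcl uv hm).1 ih
    · subst hb; subst hc; exact (hcl uv hm).2 ih
theorem pvFindHead (p : Int → Bool) :
    ∀ (l : List Int), PySem.List.pyGet? (l.filter p) 0 = l.find? p := by
  intro l
  induction l with
  | nil => rfl
  | cons a t ih =>
    by_cases h : p a <;> simp [List.filter_cons, List.find?_cons, h, ← ih] <;>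
      simp [PySem.List.pyGet?_zero]

theorem pv_main (bm : Int) (el : List (Int × Int)) (nv : Int) :
    classify_tree_from_mask bm el nv = classify_tree_from_mask_alt bm el nv := by
  unfold classify_tree_from_mask classify_tree_from_mask_alt
  simp only []
  rw [pvDecode_eq, pvVerts_eq]
  simp only [pvAdj_getD]
  set edges := pvDecodeB bm el with hedges
  by_cases h5 : (PySem.List.len edges : Int) ≠ 5
  · simp only [if_pos h5]
  · simp only [if_neg h5]
    set verts := pvVertsB edges with hverts
    have hsetlen : PySem.Set.len verts = PySem.List.len verts := rfl
    rw [hsetlen]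
    by_cases h6 : (PySem.List.len verts : Int) ≠ 6
    · simp only [if_pos h6]
    · simp only [if_neg h6]
      have hlen6 : verts.length = 6 := by
        simp only [PySem.List.len_eq] at h6
        push_neg at h6
        exact_mod_cast h6
      match hv : verts with
      | [] => simp [hv] at hlen6
      | start :: rest =>
        rw [← hv]
        have hstart' : start ∈ pvVertsB edges := by rw [← hverts]; simp
        have hlen' : (pvVertsB edges).length = 6 := by rw [← hverts]; exact hlen6
        have hA := pvDfs_char edges start hstart' hlen'
        have hB := pvRelax_char edges start hstart' hlen'
        have hperm : (pvDfsLoop (pvBuildAdj edges) 16 (PySem.Set.add PySem.Set.empty start) [start]).Perm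
            ((List.range 6).foldl (fun r _ => pvRelaxRound edges r) [start]) :=
          (List.perm_ext_iff_of_nodup hA.2 hB.2).mpr
            (fun x => (hA.1 x).trans (hB.1 x).symm)
        have hlenvr := hperm.length_eq
        rw [hv]
        dsimp only
        have hnv6 : PySem.List.len (start :: rest) = (6 : Int) := not_ne_iff.mp h6
        have hlenI : PySem.List.len (pvDfsLoop (pvBuildAdj edges) 16 (PySem.Set.add PySem.Set.empty start) [start])
            = PySem.List.len ((List.range 6).foldl (fun r _ => pvRelaxRound edges r) [start]) := by
          simp only [PySem.List.len_eq]
          exact_mod_cast hlenvr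
        rw [hnv6, hlenI]
        by_cases hreach : PySem.List.len ((List.range 6).foldl (fun r _ => pvRelaxRound edges r) [start]) ≠ (6 : Int)
        · simp only [if_pos hreach]
        · simp only [if_neg hreach]
          set ds := PySem.List.sorted ((start :: rest).map (fun v => (PySem.List.len (pvNbrs edges v) : Int))) (fun x => x) false with hds
          have htab : (PySem.Dict.ofList
              [([1, 1, 2, 2, 2, 2], 0), ([1, 1, 1, 1, 1, 5], 5),
               ([1, 1, 1, 1, 3, 3], 4), ([1, 1, 1, 1, 2, 4], 3)] : PySem.Dict (List Int) Int).get? ds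
              = if ([1, 1, 2, 2, 2, 2] : List Int) = ds then some 0
                else if ([1, 1, 1, 1, 1, 5] : List Int) = ds then some 5
                else if ([1, 1, 1, 1, 3, 3] : List Int) = ds then some 4
                else if ([1, 1, 1, 1, 2, 4] : List Int) = ds then some 3
                else none := by
            have htabmk : (PySem.Dict.ofList
                [([1, 1, 2, 2, 2, 2], 0), ([1, 1, 1, 1, 1, 5], 5),
                 ([1, 1, 1, 1, 3, 3], 4), ([1, 1, 1, 1, 2, 4], 3)] : PySem.Dict (List Int) Int)
                = PySem.Dict.mk
                [([1, 1, 2, 2, 2, 2], 0), ([1, 1, 1, 1, 1, 5], 5),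
                 ([1, 1, 1, 1, 3, 3], 4), ([1, 1, 1, 1, 2, 4], 3)] := rfl
            rw [htabmk]
            simp only [PySem.Dict.get?_mk_cons]
            have hnil : (PySem.Dict.mk ([] : List (List Int × Int))).get? ds = none := rfl
            rw [hnil]
            simp only [beq_iff_eq]
          rw [htab]
          by_cases e1 : ds = [1, 1, 2, 2, 2, 2]
          · have e1' : ([1, 1, 2, 2, 2, 2] : List Int) = ds := e1.symm
            simp [e1, ← e1']
          · have e1' : ¬ ([1, 1, 2, 2, 2, 2] : List Int) = ds := fun h => e1 h.symm
            simp only [if_neg e1, if_neg e1']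
            by_cases e2 : ds = [1, 1, 1, 1, 1, 5]
            · have e2' : ([1, 1, 1, 1, 1, 5] : List Int) = ds := e2.symm
              simp [e2, ← e2']
            · have e2' : ¬ ([1, 1, 1, 1, 1, 5] : List Int) = ds := fun h => e2 h.symm
              simp only [if_neg e2, if_neg e2']
              by_cases e3 : ds = [1, 1, 1, 1, 3, 3]
              · have e3' : ([1, 1, 1, 1, 3, 3] : List Int) = ds := e3.symm
                simp [e3, ← e3']
              · have e3' : ¬ ([1, 1, 1, 1, 3, 3] : List Int) = ds := fun h => e3 h.symm
                simp only [if_neg e3, if_neg e3']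
                by_cases e4 : ds = [1, 1, 1, 1, 2, 4]
                · have e4' : ([1, 1, 1, 1, 2, 4] : List Int) = ds := e4.symm
                  simp [e4, ← e4']
                · have e4' : ¬ ([1, 1, 1, 1, 2, 4] : List Int) = ds := fun h => e4 h.symm
                  simp only [if_neg e4, if_neg e4']
                  by_cases e5 : ds = [1, 1, 1, 2, 2, 3]
                  · simp only [if_pos e5, e5, ne_eq, not_true_eq_false, if_false]
                    rw [pvFindHead]
                    simp only [if_true]
                  · simp [if_neg e5, e5]

-- ===== VERDICT (by name: the statement is the Claim_ definition above) =====
theorem classify_tree_from_mask_spec : Claim_equal_classify_tree_from_mask := by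
  intro base_mask edge_list n_vertices _
  unfold Spec_classify_tree_from_mask
  exact pv_main base_mask edge_list n_vertices
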